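-- pv_equiv track=rewrite | github.com/sdev138/Leetcode_Solutions | Problem874.py | iterateDirection
-- ===== SOURCE A (Python) =====
-- def iterateDirection(
--     currentPoint, currentDirection, obstacles, command
-- ) -> list[int]:
-- # use list splicing to check if the point is within a certain range
--     if currentDirection == "north":
--         i = 0
--         while i < command:
--             if [currentPoint[0], currentPoint[-1] + 1] in obstacles:
--                 break
--             currentPoint = [currentPoint[0], currentPoint[-1] + 1]
--             i += 1
--     elif currentDirection == "south":
--         i = 0
--         while i < command:
--             if [currentPoint[0], currentPoint[-1] - 1] in obstacles:
--                 break
--             currentPoint = [currentPoint[0], currentPoint[-1] - 1]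
--             i += 1
--     elif currentDirection == "west":
--         i = 0
--         while i < command:
--             if [currentPoint[0] - 1, currentPoint[-1]] in obstacles:
--                 break
--             currentPoint = [currentPoint[0] - 1, currentPoint[-1]]
--             i += 1
--     else:  # east
--         i = 0
--         while i < command:
--             if [currentPoint[0] + 1, currentPoint[-1]] in obstacles:
--                 break
--             currentPoint = [currentPoint[0] + 1, currentPoint[-1]]
--             i += 1
--
--     # returning the current point once the algorithm finishes
--     return currentPoint
-- ===== SOURCE B (Python) =====
-- def iterateDirection(currentPoint, currentDirection, obstacles, command) -> list[int]:
--     # Closed form: one scan of obstacles for the nearest blocker ahead, then one jump.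
--     if command <= 0:
--         return currentPoint
--     x, y = currentPoint[0], currentPoint[-1]
--     if currentDirection == "north":
--         dx, dy = 0, 1
--     elif currentDirection == "south":
--         dx, dy = 0, -1
--     elif currentDirection == "west":
--         dx, dy = -1, 0
--     else:  # east
--         dx, dy = 1, 0
--     best = None
--     for ob in obstacles:
--         if len(ob) != 2:
--             continue
--         ox, oy = ob
--         d = (ox - x) * dx + (oy - y) * dy
--         if d > 0 and ox - x == dx * d and oy - y == dy * d:
--             if best is None or d < best:
--                 best = d
--     steps = command if best is None else min(command, best - 1)
--     if steps == 0:
--         return currentPoint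
--     return [x + dx * steps, y + dy * steps]
-- ===== Notes on version B (the rewrite author's own statement) =====
-- stated objective: faster
-- what changed: Replaces the step-by-step walk (one membership scan of obstacles per step) with a single scan of obstacles computing the nearest blocker ahead on the ray, then one arithmetic jump.
-- outside the precondition, e.g. on iterateDirection([], 'north', [], 3): A raises IndexError, B raises IndexError
import Mathlib
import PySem

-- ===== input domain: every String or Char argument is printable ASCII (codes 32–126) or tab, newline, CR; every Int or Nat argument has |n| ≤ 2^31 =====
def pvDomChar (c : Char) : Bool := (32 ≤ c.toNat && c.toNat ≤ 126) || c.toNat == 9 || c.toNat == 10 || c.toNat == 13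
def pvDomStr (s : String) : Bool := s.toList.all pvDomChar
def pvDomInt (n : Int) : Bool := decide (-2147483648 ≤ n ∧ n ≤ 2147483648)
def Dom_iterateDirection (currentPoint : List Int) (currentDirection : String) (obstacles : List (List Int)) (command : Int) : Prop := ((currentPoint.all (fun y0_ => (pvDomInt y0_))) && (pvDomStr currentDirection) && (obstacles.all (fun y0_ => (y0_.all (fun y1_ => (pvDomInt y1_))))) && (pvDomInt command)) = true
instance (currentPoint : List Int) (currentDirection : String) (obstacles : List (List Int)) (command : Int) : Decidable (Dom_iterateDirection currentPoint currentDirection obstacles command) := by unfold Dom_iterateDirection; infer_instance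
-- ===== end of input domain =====

-- B replaces A's step-by-step walk with a single scan of obstacles for the nearest blocker
-- ahead plus one arithmetic jump (asymptotically fewer operations for large commands).


-- ===== PORT A =====
-- currentPoint[0]  (Pre_ guarantees the list is nonempty whenever Python indexes it)
def pvCurX (p : List Int) : Int := p.headD 0
-- currentPoint[-1]
def pvCurY (p : List Int) : Int := p.getLastD 0

-- the while loop shared by the four branches (fuel = number of remaining allowed steps)
def pvLoopA (dx dy : Int) (obstacles : List (List Int)) : Nat → List Int → List Int
  | 0, p => p
  | n + 1, p =>
      let q := [pvCurX p + dx, pvCurY p + dy]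
      if q ∈ obstacles then p else pvLoopA dx dy obstacles n q

def iterateDirection (currentPoint : List Int) (currentDirection : String) (obstacles : List (List Int)) (command : Int) : List Int :=
  if currentDirection = "north" then pvLoopA 0 1 obstacles command.toNat currentPoint
  else if currentDirection = "south" then pvLoopA 0 (-1) obstacles command.toNat currentPoint
  else if currentDirection = "west" then pvLoopA (-1) 0 obstacles command.toNat currentPoint
  else pvLoopA 1 0 obstacles command.toNat currentPoint

-- ===== PORT B =====
-- one obstacle considered: keep the smallest forward distance seen so far
def pvStep (x y dx dy : Int) (best : Option Int) (ob : List Int) : Option Int :=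
  match ob with
  | [ox, oy] =>
      let d := (ox - x) * dx + (oy - y) * dy
      if 0 < d ∧ ox - x = dx * d ∧ oy - y = dy * d then
        match best with
        | none => some d
        | some b => if d < b then some d else some b
      else best
  | _ => best

def iterateDirection_alt (currentPoint : List Int) (currentDirection : String) (obstacles : List (List Int)) (command : Int) : List Int :=
  if command ≤ 0 then currentPoint
  else
    let x := currentPoint.headD 0      -- currentPoint[0]
    let y := currentPoint.getLastD 0   -- currentPoint[-1]
    let dd : Int × Int :=
      if currentDirection = "north" then (0, 1)
      else if currentDirection = "south" then (0, -1)
      else if currentDirection = "west" then (-1, 0)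
      else (1, 0)
    let best := obstacles.foldl (pvStep x y dd.1 dd.2) none
    let steps : Int := match best with | none => command | some b => min command (b - 1)
    if steps = 0 then currentPoint else [x + dd.1 * steps, y + dd.2 * steps]

-- ===== PRECONDITION & SPEC =====
-- Pre_ excludes only inputs where Python A raises IndexError: an empty currentPoint with a positive command.
def Pre_iterateDirection (currentPoint : List Int) (currentDirection : String) (obstacles : List (List Int)) (command : Int) : Prop :=
  0 < command → currentPoint ≠ []
instance (currentPoint : List Int) (currentDirection : String) (obstacles : List (List Int)) (command : Int) : Decidable (Pre_iterateDirection currentPoint currentDirection obstacles command) := by unfold Pre_iterateDirection; infer_instance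

def pvWitness_iterateDirection : List Int × String × List (List Int) × Int := ([0, 0], "north", [[0, 3]], 5)

def Spec_iterateDirection (currentPoint : List Int) (currentDirection : String) (obstacles : List (List Int)) (command : Int) (out : List Int) : Prop := out = iterateDirection_alt currentPoint currentDirection obstacles command
instance (currentPoint : List Int) (currentDirection : String) (obstacles : List (List Int)) (command : Int) (out : List Int) : Decidable (Spec_iterateDirection currentPoint currentDirection obstacles command out) := by unfold Spec_iterateDirection; infer_instance

-- ===== CLAIM (what is proved, stated in full; the proofs are below) =====
def Claim_equal_iterateDirection : Prop := ∀ (currentPoint : List Int) (currentDirection : String) (obstacles : List (List Int)) (command : Int), Dom_iterateDirection currentPoint currentDirection obstacles command → Pre_iterateDirection currentPoint currentDirection obstacles command → Spec_iterateDirection currentPoint currentDirection obstacles command (iterateDirection currentPoint currentDirection obstacles command)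

-- ===== LEMMAS AND PROOFS =====

-- the contribution of one obstacle: its forward distance on the ray, if it is ahead
def pvDf (x y dx dy : Int) (ob : List Int) : Option Int :=
  match ob with
  | [ox, oy] =>
      if 0 < (ox - x) * dx + (oy - y) * dy ∧
          ox - x = dx * ((ox - x) * dx + (oy - y) * dy) ∧
          oy - y = dy * ((ox - x) * dx + (oy - y) * dy) then
        some ((ox - x) * dx + (oy - y) * dy)
      else none
  | _ => none

def pvDists (x y dx dy : Int) (obs : List (List Int)) : List Int :=
  obs.filterMap (pvDf x y dx dy)

def pvMinStep (a : Option Int) (d : Int) : Option Int :=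
  match a with
  | none => some d
  | some b => if d < b then some d else some b

-- the four unit directions
def pvUnit (dx dy : Int) : Prop :=
  (dx = 0 ∧ (dy = 1 ∨ dy = -1)) ∨ (dy = 0 ∧ (dx = 1 ∨ dx = -1))

lemma pvStep_df (x y dx dy : Int) (acc : Option Int) (ob : List Int) :
    pvStep x y dx dy acc ob =
      match pvDf x y dx dy ob with
      | none => acc
      | some d => pvMinStep acc d := by
  rcases ob with _ | ⟨ox, _ | ⟨oy, _ | ⟨z, t⟩⟩⟩ <;>
    simp only [pvStep, pvDf] <;> try rfl
  split_ifs <;> rfl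

lemma pvFold_eq (x y dx dy : Int) :
    ∀ (obs : List (List Int)) (acc : Option Int),
      obs.foldl (pvStep x y dx dy) acc = (pvDists x y dx dy obs).foldl pvMinStep acc := by
  intro obs
  induction obs with
  | nil => intro acc; rfl
  | cons ob t ih =>
      intro acc
      simp only [List.foldl_cons, pvDists, List.filterMap_cons]
      rw [pvStep_df]
      cases pvDf x y dx dy ob <;> simp [List.foldl_cons, ih, pvDists]

lemma pvDf_eq_some (x y dx dy : Int) (h : pvUnit dx dy) (ob : List Int) (d : Int) :
    pvDf x y dx dy ob = some d ↔ 0 < d ∧ ob = [x + dx * d, y + dy * d] := by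
  rcases ob with _ | ⟨ox, _ | ⟨oy, _ | ⟨z, t⟩⟩⟩
  · simp [pvDf]
  · simp [pvDf]
  · simp only [pvDf, List.cons.injEq, and_true]
    rcases h with ⟨h0, h0'⟩ | ⟨h0, h0'⟩ <;> rcases h0' with h0' | h0' <;> subst h0 <;> subst h0' <;>
    · split_ifs with hc
      · simp only [Option.some.injEq]
        constructor
        · intro hd
          obtain ⟨hp, ha, hb⟩ := hc
          refine ⟨by omega, by omega, by omega⟩
        · rintro ⟨hp, ha, hb⟩
          omega
      · simp only [reduceCtorEq, false_iff]
        rintro ⟨hp, ha, hb⟩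
        exact hc ⟨by omega, by omega, by omega⟩
  · simp [pvDf]

lemma pvDists_pos (x y dx dy : Int) (h : pvUnit dx dy) (obs : List (List Int)) :
    ∀ d ∈ pvDists x y dx dy obs, 0 < d := by
  intro d hd
  simp only [pvDists, List.mem_filterMap] at hd
  obtain ⟨ob, _, hob⟩ := hd
  exact ((pvDf_eq_some x y dx dy h ob d).mp hob).1

lemma pvDists_shift (x y dx dy : Int) (h : pvUnit dx dy) :
    ∀ (obs : List (List Int)), [x + dx, y + dy] ∉ obs →
      pvDists (x + dx) (y + dy) dx dy obs = (pvDists x y dx dy obs).map (fun d => d - 1) := by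
  intro obs
  induction obs with
  | nil => intro _; rfl
  | cons ob t ih =>
      intro hnot
      have hne : ob ≠ [x + dx, y + dy] := fun he => hnot (by simp [he])
      have hnt : [x + dx, y + dy] ∉ t := fun he => hnot (List.mem_cons_of_mem _ he)
      simp only [pvDists] at *
      rw [List.filterMap_cons, List.filterMap_cons]
      have hhead : pvDf (x + dx) (y + dy) dx dy ob = Option.map (fun d => d - 1) (pvDf x y dx dy ob) := by
        rcases hdf : pvDf x y dx dy ob with _ | d
        · rw [Option.map_none]
          rcases hdf2 : pvDf (x + dx) (y + dy) dx dy ob with _ | e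
          · rfl
          · rw [pvDf_eq_some _ _ _ _ h] at hdf2
            obtain ⟨he, hob⟩ := hdf2
            have hcontra : pvDf x y dx dy ob = some (e + 1) := by
              rw [pvDf_eq_some _ _ _ _ h]
              refine ⟨by omega, ?_⟩
              rw [hob]
              simp only [List.cons.injEq, and_true]
              constructor <;> ring
            rw [hcontra] at hdf
            exact absurd hdf (by simp)
        · rw [pvDf_eq_some _ _ _ _ h] at hdf
          obtain ⟨hd, hob⟩ := hdf
          have hd1 : d ≠ 1 := by
            intro h1
            apply hne
            rw [hob, h1]
            norm_num
          rw [Option.map_some, pvDf_eq_some _ _ _ _ h]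
          refine ⟨by omega, ?_⟩
          rw [hob]
          simp only [List.cons.injEq, and_true]
          constructor <;> ring
      rw [hhead]
      cases pvDf x y dx dy ob <;> simp [ih hnt]

lemma pvFoldlMin_le_init : ∀ (l : List Int) (a : Int), l.foldl min a ≤ a := by
  intro l
  induction l with
  | nil => intro a; simp
  | cons u v ih => intro a; simp only [List.foldl_cons]; exact le_trans (ih _) (min_le_left _ _)

lemma pvFoldlMin_le_mem : ∀ (l : List Int) (a d : Int), d ∈ l → l.foldl min a ≤ d := by
  intro l
  induction l with
  | nil => intro a d hd; simp at hd
  | cons x t ih =>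
      intro a d hd
      rcases List.mem_cons.mp hd with h | h
      · subst h
        exact le_trans (pvFoldlMin_le_init t _) (min_le_right _ _)
      · exact ih _ _ h

lemma pvFoldlMin_mem : ∀ (l : List Int) (a : Int), l.foldl min a = a ∨ l.foldl min a ∈ l := by
  intro l
  induction l with
  | nil => intro a; left; rfl
  | cons x t ih =>
      intro a
      rcases ih (min a x) with h | h
      · rcases le_total a x with hax | hax
        · left; simp only [List.foldl_cons]; rw [h, min_eq_left hax]
        · right
          simp only [List.foldl_cons]
          rw [h, min_eq_right hax]
          simp
      · right
        simp only [List.foldl_cons] at h ⊢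
        exact List.mem_cons_of_mem _ h

lemma pvFoldMin_some (l : List Int) : ∀ (a : Int), l.foldl pvMinStep (some a) = some (l.foldl min a) := by
  induction l with
  | nil => intro a; rfl
  | cons d t ih =>
      intro a
      simp only [List.foldl_cons]
      have hstep : pvMinStep (some a) d = some (min a d) := by
        simp only [pvMinStep]
        split_ifs with hc <;> simp [min_def] <;> omega
      rw [hstep, ih]

lemma pvFoldNone_eq_none (l : List Int) (hf : l.foldl pvMinStep none = none) : l = [] := by
  rcases l with _ | ⟨c, t⟩
  · rfl
  · rw [show ((c :: t).foldl pvMinStep none) = t.foldl pvMinStep (some c) from rfl,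
      pvFoldMin_some] at hf
    exact absurd hf (by simp)

lemma pvFoldNone_char (l : List Int) (b : Int) (hf : l.foldl pvMinStep none = some b) :
    b ∈ l ∧ ∀ d ∈ l, b ≤ d := by
  rcases l with _ | ⟨c, t⟩
  · simp [List.foldl] at hf
  · rw [show ((c :: t).foldl pvMinStep none) = t.foldl pvMinStep (some c) from rfl,
      pvFoldMin_some] at hf
    injection hf with hf
    constructor
    · rcases pvFoldlMin_mem t c with h2 | h2
      · rw [← hf, h2]; simp
      · rw [← hf]; exact List.mem_cons_of_mem _ h2
    · intro d hd
      rcases List.mem_cons.mp hd with h2 | h2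
      · rw [← hf, h2]; exact pvFoldlMin_le_init t c
      · rw [← hf]; exact pvFoldlMin_le_mem t c d h2

lemma pvMap_fold (l : List Int) : ∀ (acc : Option Int),
    (l.map (fun d => d - 1)).foldl pvMinStep (acc.map (fun d => d - 1)) =
      Option.map (fun d => d - 1) (l.foldl pvMinStep acc) := by
  induction l with
  | nil => intro acc; rfl
  | cons d t ih =>
      intro acc
      simp only [List.map_cons, List.foldl_cons]
      have hstep : pvMinStep (acc.map (fun d => d - 1)) (d - 1) =
          Option.map (fun d => d - 1) (pvMinStep acc d) := by
        rcases acc with _ | b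
        · rfl
        · simp only [Option.map_some, pvMinStep]
          split_ifs with h1 h2 h2 <;> simp <;> omega
      rw [hstep, ih]

-- the number of steps A's loop takes, expressed through B's minimum
def pvS (dx dy x y : Int) (obs : List (List Int)) (n : Nat) : Int :=
  match (pvDists x y dx dy obs).foldl pvMinStep none with
  | none => (n : Int)
  | some b => min (n : Int) (b - 1)

lemma pvLoopA_eq (dx dy : Int) (h : pvUnit dx dy) (obs : List (List Int)) :
    ∀ (n : Nat) (x y : Int) (p : List Int), pvCurX p = x → pvCurY p = y →
      pvLoopA dx dy obs n p =
        if pvS dx dy x y obs n = 0 then p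
        else [x + dx * pvS dx dy x y obs n, y + dy * pvS dx dy x y obs n] := by
  intro n
  induction n with
  | zero =>
      intro x y p hx hy
      rcases hf : (pvDists x y dx dy obs).foldl pvMinStep none with _ | b
      · simp [pvS, hf, pvLoopA]
      · have hb0 : 0 < b := pvDists_pos x y dx dy h obs b (pvFoldNone_char _ _ hf).1
        simp only [pvS, hf, Nat.cast_zero]
        rw [if_pos (by omega : min (0 : Int) (b - 1) = 0)]
        rfl
  | succ n ih =>
      intro x y p hx hy
      show (if [pvCurX p + dx, pvCurY p + dy] ∈ obs then p
            else pvLoopA dx dy obs n [pvCurX p + dx, pvCurY p + dy]) = _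
      rw [hx, hy]
      by_cases hq : [x + dx, y + dy] ∈ obs
      · rw [if_pos hq]
        have h1 : (1 : Int) ∈ pvDists x y dx dy obs := by
          simp only [pvDists, List.mem_filterMap]
          refine ⟨[x + dx, y + dy], hq, ?_⟩
          rw [pvDf_eq_some x y dx dy h]
          refine ⟨by norm_num, by norm_num⟩
        rcases hf : (pvDists x y dx dy obs).foldl pvMinStep none with _ | b
        · rw [pvFoldNone_eq_none _ hf] at h1
          simp at h1
        · obtain ⟨hmem, hle⟩ := pvFoldNone_char _ _ hf
          have hb1 : b ≤ 1 := hle 1 h1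
          have hb0 : 0 < b := pvDists_pos x y dx dy h obs b hmem
          simp only [pvS, hf]
          rw [if_pos (by omega : min ((n + 1 : Nat) : Int) (b - 1) = 0)]
      · rw [if_neg hq]
        rw [ih (x + dx) (y + dy) _ rfl (by simp [pvCurY])]
        have hshift := pvDists_shift x y dx dy h obs hq
        have hmap : (List.map (fun d => d - 1) (pvDists x y dx dy obs)).foldl pvMinStep none =
            Option.map (fun d => d - 1) ((pvDists x y dx dy obs).foldl pvMinStep none) := by
          simpa using pvMap_fold (pvDists x y dx dy obs) none
        have h1notin : (1 : Int) ∉ pvDists x y dx dy obs := by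
          intro h1
          simp only [pvDists, List.mem_filterMap] at h1
          obtain ⟨ob, hob, hdf⟩ := h1
          rw [pvDf_eq_some x y dx dy h] at hdf
          apply hq
          have hob2 : ob = [x + dx, y + dy] := by rw [hdf.2]; norm_num
          rwa [hob2] at hob
        rcases hf : (pvDists x y dx dy obs).foldl pvMinStep none with _ | b
        · simp only [pvS, hshift, hmap, hf, Option.map_none]
          rw [if_neg (by push_cast; omega : ¬ ((n + 1 : Nat) : Int) = 0)]
          by_cases hn : n = 0
          · subst hn; norm_num
          · rw [if_neg (by push_cast; omega : ¬ ((n : Nat) : Int) = 0)]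
            simp only [List.cons.injEq, and_true]
            push_cast
            constructor <;> ring
        · obtain ⟨hmem, hle⟩ := pvFoldNone_char _ _ hf
          have hb0 : 0 < b := pvDists_pos x y dx dy h obs b hmem
          have hb1 : b ≠ 1 := fun he => h1notin (he ▸ hmem)
          simp only [pvS, hshift, hmap, hf, Option.map_some]
          have hSrel : min ((n + 1 : Nat) : Int) (b - 1) = min ((n : Nat) : Int) (b - 1 - 1) + 1 := by
            push_cast
            omega
          rw [hSrel, if_neg (by omega : ¬ min ((n : Nat) : Int) (b - 1 - 1) + 1 = 0)]
          by_cases hS0 : min ((n : Nat) : Int) (b - 1 - 1) = 0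
          · rw [if_pos hS0, hS0]
            norm_num
          · rw [if_neg hS0]
            simp only [List.cons.injEq, and_true]
            constructor <;> ring

-- ===== VERDICT (by name: the statement is the Claim_ definition above) =====
theorem iterateDirection_spec : Claim_equal_iterateDirection := by
  intro p dir obs cmd _ hpre
  unfold Spec_iterateDirection iterateDirection iterateDirection_alt
  by_cases hc : cmd ≤ 0
  · have h0 : cmd.toNat = 0 := Int.toNat_of_nonpos hc
    rw [if_pos hc, h0]
    split_ifs <;> rfl
  · rw [if_neg hc]
    have hcmd : (cmd.toNat : Int) = cmd := Int.toNat_of_nonneg (by omega)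
    have key : ∀ dx dy : Int, pvUnit dx dy →
        pvLoopA dx dy obs cmd.toNat p =
          (let x := p.headD 0
           let y := p.getLastD 0
           let best := obs.foldl (pvStep x y dx dy) none
           let steps : Int := match best with | none => cmd | some b => min cmd (b - 1)
           if steps = 0 then p else [x + dx * steps, y + dy * steps]) := by
      intro dx dy hu
      rw [pvLoopA_eq dx dy hu obs cmd.toNat (p.headD 0) (p.getLastD 0) p rfl rfl]
      rcases hf : (pvDists (p.headD 0) (p.getLastD 0) dx dy obs).foldl pvMinStep none with _ | b <;>
        simp only [pvS, pvFold_eq, hf, hcmd]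
    split_ifs with h1 h2 h3
    · simpa using key 0 1 (by unfold pvUnit; norm_num)
    · simpa using key 0 (-1) (by unfold pvUnit; norm_num)
    · simpa using key (-1) 0 (by unfold pvUnit; norm_num)
    · simpa using key 1 0 (by unfold pvUnit; norm_num)
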